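-- pv_equiv track=rewrite | github.com/orennjii/all-pii-in-one | src/app/tabs/audio_tab/utils/ui_helpers.py | update_selected_voices
-- ===== SOURCE A (Python) =====
-- def update_selected_voices(selected_voices, current_selected):
--     """
--     更新已选择的参考声音列表
--
--     参数:
--         selected_voices: 当前已选择的参考声音列表
--         current_selected: 当前选择的声音路径
--
--     返回:
--         list: 更新后的选择列表
--     """
--     if not current_selected:
--         return selected_voices
--
--     # 处理列表输入
--     if isinstance(current_selected, list):
--         updated_selected = selected_voices.copy() if selected_voices else []
--         for item in current_selected:
--             updated_selected = update_selected_voices(updated_selected, item)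
--         return updated_selected
--
--     # 非字符串输入检查
--     if not isinstance(current_selected, str):
--         return selected_voices
--
--     # 如果声音已在列表中，则移除；否则添加
--     if current_selected in selected_voices:
--         return [v for v in selected_voices if v != current_selected]
--     else:
--         return selected_voices + [current_selected]
-- ===== SOURCE B (Python) =====
-- def update_selected_voices(selected_voices, current_selected):
--     # One-pass accumulator loop with a found flag instead of membership test + filter.
--     if not current_selected:
--         return selected_voices
--     acc = []
--     found = False
--     for v in selected_voices:
--         if v == current_selected:
--             found = True
--         else:
--             acc.append(v)
--     if found:
--         return acc
--     acc.append(current_selected)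
--     return acc
-- ===== Notes on version B (the rewrite author's own statement) =====
-- stated objective: alternative
-- what changed: Replaces A's membership test followed by a separate removal comprehension (two scans) with a single accumulator loop carrying a found flag that decides between the filtered accumulator and appending the voice; A's list-recursion branch, unreachable for Optional[str] inputs, is dropped.
import Mathlib
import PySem

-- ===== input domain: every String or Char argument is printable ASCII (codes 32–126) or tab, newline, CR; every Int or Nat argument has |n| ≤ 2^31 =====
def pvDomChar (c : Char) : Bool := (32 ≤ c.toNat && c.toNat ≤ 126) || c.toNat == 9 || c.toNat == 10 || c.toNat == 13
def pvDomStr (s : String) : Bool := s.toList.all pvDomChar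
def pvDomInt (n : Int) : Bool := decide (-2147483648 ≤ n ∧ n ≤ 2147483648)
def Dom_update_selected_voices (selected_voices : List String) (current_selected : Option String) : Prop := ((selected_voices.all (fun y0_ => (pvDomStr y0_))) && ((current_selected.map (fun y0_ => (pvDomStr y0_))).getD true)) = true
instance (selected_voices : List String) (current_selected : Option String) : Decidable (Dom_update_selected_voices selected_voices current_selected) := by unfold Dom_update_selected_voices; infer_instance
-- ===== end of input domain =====

-- B replaces A's membership-test-then-filter (two scans) with a single
-- accumulator loop carrying a found flag; same return value ("alternative").

-- ===== PORT A =====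
-- Port of A: guard on falsy current_selected, then membership test followed by
-- a removal comprehension or an append. (The list branch of A is unreachable for
-- Optional[str] inputs and the non-str check always passes, so neither appears.)
def update_selected_voices (selected_voices : List String) (current_selected : Option String) : List String :=
  match current_selected with
  | none => selected_voices
  | some s =>
    if s = "" then selected_voices
    else if s ∈ selected_voices then
      selected_voices.filter (fun v => v ≠ s)
    else
      selected_voices ++ [s]

-- ===== PORT B =====
-- Port of B's for-loop: state (acc, found); after the loop, acc or acc.append(s).
def uvLoop (s : String) : List String → List String → Bool → List String
  | [], acc, found => if found then acc else acc ++ [s]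
  | v :: t, acc, found =>
    if v = s then uvLoop s t acc true
    else uvLoop s t (acc ++ [v]) found

def update_selected_voices_alt (selected_voices : List String) (current_selected : Option String) : List String :=
  match current_selected with
  | none => selected_voices
  | some s => if s = "" then selected_voices else uvLoop s selected_voices [] false

-- ===== PRECONDITION & SPEC =====
def Spec_update_selected_voices (selected_voices : List String) (current_selected : Option String) (out : List String) : Prop := out = update_selected_voices_alt selected_voices current_selected
instance (selected_voices : List String) (current_selected : Option String) (out : List String) : Decidable (Spec_update_selected_voices selected_voices current_selected out) := by unfold Spec_update_selected_voices; infer_instance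

-- ===== CLAIM (what is proved, stated in full; the proofs are below) =====
def Claim_equal_update_selected_voices : Prop := ∀ (selected_voices : List String) (current_selected : Option String), Dom_update_selected_voices selected_voices current_selected → Spec_update_selected_voices selected_voices current_selected (update_selected_voices selected_voices current_selected)

-- ===== LEMMAS AND PROOFS =====
-- Loop invariant: uvLoop returns acc ++ filter if the element was/will be found,
-- otherwise acc ++ xs ++ [s].
lemma uvLoop_eq (s : String) (xs acc : List String) (found : Bool) :
    uvLoop s xs acc found =
      if found || decide (s ∈ xs) then acc ++ xs.filter (fun v => v ≠ s)
      else acc ++ xs ++ [s] := by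
  induction xs generalizing acc found with
  | nil => simp [uvLoop]
  | cons v t ih =>
    by_cases hv : v = s
    · subst hv
      simp [uvLoop, ih]
    · have hv' : s ≠ v := fun h => hv h.symm
      have hmc : (s ∈ v :: t) ↔ (s ∈ t) := by simp [hv']
      have hvf : decide (v ≠ s) = true := by simp [hv]
      simp only [uvLoop, if_neg hv, ih, List.filter_cons, hvf, if_true, hmc]
      split_ifs with h <;> simp

-- ===== VERDICT (by name: the statement is the Claim_ definition above) =====
theorem update_selected_voices_spec : Claim_equal_update_selected_voices := by
  intro xs c _
  unfold Spec_update_selected_voices update_selected_voices update_selected_voices_alt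
  cases c with
  | none => rfl
  | some s =>
    by_cases hs : s = ""
    · simp [hs]
    · simp only [if_neg hs, uvLoop_eq, Bool.false_or]
      by_cases hm : s ∈ xs
      · simp [hm]
      · simp [hm]
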